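-- pv_equiv track=rewrite | github.com/MTrifonow/Hackaton | deletesubtuple.py | delete_subtuple
-- ===== SOURCE A (Python) =====
-- def delete_subtuple(large_tuple, subtuple):
--
--     index = -1
--
--     for i in range(len(large_tuple) - len(subtuple) + 1):
--         if large_tuple[i:i+len(subtuple)] == subtuple:
--             index = i
--             break
--
--
--     if index != -1:
--         result_list = list(large_tuple)
--         result_list = result_list[:index] + result_list[index+len(subtuple):]
--         return tuple(result_list)
--     else:
--         return large_tuple
-- ===== SOURCE B (Python) =====
-- def delete_subtuple(large_tuple, subtuple):
--     m = len(subtuple)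
--     n = len(large_tuple)
--     prefix = []
--     i = 0
--     while i + m <= n:
--         if large_tuple[i:i+m] == subtuple:
--             return tuple(prefix) + large_tuple[i+m:]
--         prefix.append(large_tuple[i])
--         i += 1
--     return large_tuple
-- ===== Notes on version B (the rewrite author's own statement) =====
-- stated objective: alternative
-- what changed: Replaces A's two-phase scheme (find the match index with a for/break loop and a -1 sentinel, then rebuild by slicing twice) with a single forward pass that accumulates the kept prefix and returns the spliced result immediately at the first suffix match, with no sentinel and no second pass.
import Mathlib
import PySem

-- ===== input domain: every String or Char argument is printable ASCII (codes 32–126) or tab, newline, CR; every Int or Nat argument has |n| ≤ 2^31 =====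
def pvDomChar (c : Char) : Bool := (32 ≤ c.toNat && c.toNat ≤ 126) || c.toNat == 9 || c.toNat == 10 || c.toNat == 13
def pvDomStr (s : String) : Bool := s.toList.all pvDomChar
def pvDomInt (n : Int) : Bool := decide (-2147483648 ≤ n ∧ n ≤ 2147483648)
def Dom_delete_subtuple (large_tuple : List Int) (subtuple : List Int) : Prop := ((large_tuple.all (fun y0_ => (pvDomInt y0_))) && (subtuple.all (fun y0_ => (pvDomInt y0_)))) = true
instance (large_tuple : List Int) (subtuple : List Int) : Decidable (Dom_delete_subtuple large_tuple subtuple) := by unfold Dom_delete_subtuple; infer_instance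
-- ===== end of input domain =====

-- B replaces A's index loop of slice comparisons plus slice reconstruction by one structural
-- scan that accumulates the kept prefix and splices at the first suffix match (alternative
-- decomposition, same asymptotic cost).

-- ===== PORT A =====
-- the for-loop with break searching for the first matching index (index starts at -1)
def aFind (large_tuple subtuple : List Int) : List Int → Int
  | [] => -1
  | i :: is =>
      if PySem.List.slice large_tuple (some i) (some (i + (subtuple.length : Int))) = subtuple
      then i
      else aFind large_tuple subtuple is

def delete_subtuple (large_tuple : List Int) (subtuple : List Int) : List Int :=
  let index := aFind large_tuple subtuple
      (PySem.List.pyRange 0 ((large_tuple.length : Int) - (subtuple.length : Int) + 1) 1)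
  if index ≠ -1 then
    PySem.List.slice large_tuple none (some index) ++
      PySem.List.slice large_tuple (some (index + (subtuple.length : Int))) none
  else large_tuple

-- ===== PORT B =====
-- the while-loop: i walks candidate positions, prefix accumulates kept elements; splice on first match
def bGo (large_tuple subtuple : List Int) (pfx : List Int) (i : Nat) : List Int :=
  if h : i + subtuple.length ≤ large_tuple.length then
    if PySem.List.slice large_tuple (some (i : Int)) (some ((i : Int) + (subtuple.length : Int))) = subtuple
    then pfx ++ PySem.List.slice large_tuple (some ((i : Int) + (subtuple.length : Int))) none
    else bGo large_tuple subtuple (pfx ++ [large_tuple.getD i 0]) (i + 1)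
  else large_tuple
termination_by large_tuple.length + 1 - i
decreasing_by
  rename_i hc
  by_cases h0 : subtuple.length = 0
  · refine absurd ?_ hc
    rw [PySem.List.slice_natCast_add]
    simp [List.length_eq_zero_iff.mp h0]
  · omega

def delete_subtuple_alt (large_tuple : List Int) (subtuple : List Int) : List Int :=
  bGo large_tuple subtuple [] 0

-- ===== PRECONDITION & SPEC =====
def Spec_delete_subtuple (large_tuple : List Int) (subtuple : List Int) (out : List Int) : Prop := out = delete_subtuple_alt large_tuple subtuple
instance (large_tuple : List Int) (subtuple : List Int) (out : List Int) : Decidable (Spec_delete_subtuple large_tuple subtuple out) := by unfold Spec_delete_subtuple; infer_instance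

-- ===== CLAIM (what is proved, stated in full; the proofs are below) =====
def Claim_equal_delete_subtuple : Prop := ∀ (large_tuple : List Int) (subtuple : List Int), Dom_delete_subtuple large_tuple subtuple → Spec_delete_subtuple large_tuple subtuple (delete_subtuple large_tuple subtuple)

-- ===== LEMMAS AND PROOFS =====

-- reference recursion both sides are reduced to
def refDel (subtuple : List Int) : List Int → List Int
  | [] => []
  | x :: xs =>
      if (x :: xs).take subtuple.length = subtuple
      then (x :: xs).drop subtuple.length
      else x :: refDel subtuple xs

lemma refDel_of_lt (st : List Int) : ∀ lt : List Int, lt.length < st.length → refDel st lt = lt := by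
  intro lt
  induction lt with
  | nil => intro _; simp [refDel]
  | cons x xs ih =>
      intro h
      have hne : (x :: xs).take st.length ≠ st := by
        intro he
        have := congrArg List.length he
        simp [List.length_take, List.length_cons] at this
        simp only [List.length_cons] at h
        omega
      simp only [refDel, if_neg hne]
      rw [ih (by simpa using Nat.lt_of_succ_lt h)]

lemma refDel_of_take (st l : List Int) (h : l.take st.length = st) :
    refDel st l = l.drop st.length := by
  cases l with
  | nil =>
      have : st = [] := by simpa using h.symm
      subst this
      simp [refDel]
  | cons x xs => simp [refDel, h]

lemma bGo_eq (large st : List Int) : ∀ (k i : Nat), large.length + 1 - i ≤ k →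
    bGo large st (large.take i) i = large.take i ++ refDel st (large.drop i) := by
  intro k
  induction k with
  | zero =>
      intro i hk
      have hge : large.length < i := by omega
      rw [bGo, dif_neg (by omega)]
      simp [List.drop_eq_nil_of_le (le_of_lt hge), refDel,
        List.take_of_length_le (le_of_lt hge)]
  | succ k ih =>
      intro i hk
      have hsl : PySem.List.slice large (some (i : Int)) (some ((i : Int) + (st.length : Int))) =
          (large.drop i).take st.length := by
        have := PySem.List.slice_natCast_add (xs := large) (j := i) (n := st.length)
        simpa using this
      by_cases h : i + st.length ≤ large.length
      · rw [bGo, dif_pos h]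
        by_cases hc : (large.drop i).take st.length = st
        · rw [if_pos (by rw [hsl]; exact hc)]
          rw [PySem.List.slice_from _ (by omega)]
          have ht : ((i : Int) + (st.length : Int)).toNat = i + st.length := by omega
          rw [ht, refDel_of_take st _ hc]
          simp [List.drop_drop]
        · rw [if_neg (by rw [hsl]; exact hc)]
          have hm : 1 ≤ st.length := by
            rcases Nat.eq_zero_or_pos st.length with h0 | h1
            · exact absurd (by simp [List.length_eq_zero_iff.mp h0]) hc
            · exact h1
          have hi : i < large.length := by omega
          have hget : large.getD i 0 = large[i] := List.getD_eq_getElem large 0 hi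
          have htake : large.take i ++ [large[i]] = large.take (i + 1) :=
            (List.take_succ_eq_append_getElem hi).symm
          rw [hget, htake, ih (i + 1) (by omega)]
          have hdrop : large.drop i = large[i] :: large.drop (i + 1) :=
            (List.drop_eq_getElem_cons hi)
          rw [hdrop, refDel, if_neg (by rwa [← hdrop])]
          rw [← htake, List.append_assoc]
          rfl
      · rw [bGo, dif_neg h]
        have hfix : refDel st (large.drop i) = large.drop i := by
          by_cases hi : large.length < i
          · simp [List.drop_eq_nil_of_le (le_of_lt hi), refDel]
          · exact refDel_of_lt st _ (by simp [List.length_drop]; omega)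
        rw [hfix, List.take_append_drop]

lemma alt_eq_refDel (lt st : List Int) : delete_subtuple_alt lt st = refDel st lt := by
  have := bGo_eq lt st (lt.length + 1) 0 (by omega)
  simpa [delete_subtuple_alt] using this

lemma slice_succ (x : Int) (xs st : List Int) (i : Int) (hi : 0 ≤ i) :
    PySem.List.slice (x :: xs) (some (i + 1)) (some (i + 1 + (st.length : Int))) =
      PySem.List.slice xs (some i) (some (i + (st.length : Int))) := by
  rw [PySem.List.slice_toNat _ (by omega) (by omega),
      PySem.List.slice_toNat _ hi (by omega)]
  have h1 : (i + 1).toNat = i.toNat + 1 := by omega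
  have h2 : (i + 1 + (st.length : Int)).toNat = (i + (st.length : Int)).toNat + 1 := by omega
  rw [h1, h2]
  simp [List.drop_succ_cons]

lemma aFind_nonneg (lt st : List Int) : ∀ is : List Int, (∀ i ∈ is, 0 ≤ i) →
    aFind lt st is = -1 ∨ 0 ≤ aFind lt st is := by
  intro is
  induction is with
  | nil => intro _; left; rfl
  | cons i is ih =>
      intro h
      simp only [aFind]
      split
      · right; exact h i (by simp)
      · exact ih (fun j hj => h j (by simp [hj]))

lemma aFind_shift (x : Int) (xs st : List Int) : ∀ is : List Int, (∀ i ∈ is, 0 ≤ i) →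
    aFind (x :: xs) st (is.map (· + 1)) =
      (if aFind xs st is = -1 then -1 else aFind xs st is + 1) := by
  intro is
  induction is with
  | nil => intro _; simp [aFind]
  | cons i is ih =>
      intro h
      have hi : 0 ≤ i := h i (by simp)
      simp only [List.map_cons, aFind, slice_succ x xs st i hi]
      split
      · rw [if_neg (by omega)]
      · exact ih (fun j hj => h j (by simp [hj]))

lemma pyRange_shift (b : Int) :
    PySem.List.pyRange 1 (b + 1) 1 = (PySem.List.pyRange 0 b 1).map (· + 1) := by
  rw [PySem.List.pyRange_one 1 (b + 1), PySem.List.pyRange_one 0 b]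
  have : (b + 1 - 1) = b - 0 := by ring
  rw [this]
  simp [List.map_map, Function.comp_def]
  intro k _
  omega

lemma a_eq_refDel (st : List Int) : ∀ lt : List Int, delete_subtuple lt st = refDel st lt := by
  intro lt
  induction lt with
  | nil =>
      by_cases h : st = []
      · subst h; decide
      · have hm : 1 ≤ st.length := by
          cases st with
          | nil => exact absurd rfl h
          | cons a l => simp
        have hnil : PySem.List.pyRange 0 (-(st.length : Int) + 1) 1 = [] :=
          PySem.List.pyRange_one_eq_nil (by omega)
        simp [delete_subtuple, hnil, aFind, refDel]
  | cons x xs ih =>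
      by_cases h0 : (x :: xs).take st.length = st
      · -- match at index 0
        have hm : st.length ≤ xs.length + 1 := by
          have := congrArg List.length h0
          simp [List.length_take] at this
          omega
        have hcons : PySem.List.pyRange 0 (((x :: xs).length : Int) - (st.length : Int) + 1) 1 =
            0 :: PySem.List.pyRange 1 (((x :: xs).length : Int) - (st.length : Int) + 1) 1 := by
          have := PySem.List.pyRange_one_cons (a := 0)
            (b := ((x :: xs).length : Int) - (st.length : Int) + 1) (by simp; omega)
          simpa using this
        have hsl : PySem.List.slice (x :: xs) (some 0) (some (0 + (st.length : Int))) = st := by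
          rw [PySem.List.slice_toNat _ (by omega) (by omega)]
          simpa using h0
        simp only [delete_subtuple, hcons, aFind]
        rw [if_pos hsl, if_pos (by decide : (0 : Int) ≠ -1)]
        rw [PySem.List.slice_to _ le_rfl, PySem.List.slice_from _ (by omega)]
        simp only [refDel, if_pos h0]
        simp
      · -- no match at index 0
        by_cases hlen : xs.length + 1 < st.length
        · -- subtuple longer than the list: the range is empty
          have hnil : PySem.List.pyRange 0 ((xs.length : Int) + 1 - (st.length : Int) + 1) 1 = [] :=
            PySem.List.pyRange_one_eq_nil (by omega)
          rw [refDel_of_lt st (x :: xs) (by simp [List.length_cons]; omega)]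
          simp [delete_subtuple, hnil, aFind]
        · have hm : st.length ≤ xs.length + 1 := by omega
          have hcons : PySem.List.pyRange 0 (((x :: xs).length : Int) - (st.length : Int) + 1) 1 =
              0 :: PySem.List.pyRange 1 (((x :: xs).length : Int) - (st.length : Int) + 1) 1 := by
            have := PySem.List.pyRange_one_cons (a := 0)
              (b := ((x :: xs).length : Int) - (st.length : Int) + 1) (by simp; omega)
            simpa using this
          have hsl : PySem.List.slice (x :: xs) (some 0) (some (0 + (st.length : Int))) ≠ st := by
            rw [PySem.List.slice_toNat _ (by omega) (by omega)]
            simpa using h0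
          have hshape : ((x :: xs).length : Int) - (st.length : Int) + 1 =
              ((xs.length : Int) - (st.length : Int) + 1) + 1 := by simp; ring
          have hrange : PySem.List.pyRange 1 (((x :: xs).length : Int) - (st.length : Int) + 1) 1 =
              (PySem.List.pyRange 0 ((xs.length : Int) - (st.length : Int) + 1) 1).map (· + 1) := by
            rw [hshape, pyRange_shift]
          have hmem : ∀ i ∈ PySem.List.pyRange 0 ((xs.length : Int) - (st.length : Int) + 1) 1, 0 ≤ i := by
            intro i hi
            exact (PySem.List.mem_pyRange_one.mp hi).1
          have hshift := aFind_shift x xs st _ hmem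
          have hnn := aFind_nonneg xs st _ hmem
          set j := aFind xs st (PySem.List.pyRange 0 ((xs.length : Int) - (st.length : Int) + 1) 1) with hj
          simp only [delete_subtuple, hcons, aFind, if_neg hsl, hrange, hshift]
          rcases hnn with hneg | hpos
          · rw [if_pos hneg]
            simp only [refDel, if_neg h0]
            have hA := ih
            simp only [delete_subtuple, ← hj, hneg] at hA
            simp at hA
            rw [← hA]
            simp
          · have hne : j ≠ -1 := by omega
            rw [if_neg hne, if_pos (by omega : j + 1 ≠ -1)]
            have hA := ih
            simp only [delete_subtuple, ← hj] at hA
            rw [if_pos hne] at hA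
            simp only [refDel, if_neg h0]
            rw [← hA]
            rw [PySem.List.slice_to _ (by omega), PySem.List.slice_to _ (by omega),
                PySem.List.slice_from _ (by omega), PySem.List.slice_from _ (by omega)]
            have h1 : (j + 1).toNat = j.toNat + 1 := by omega
            have h2 : (j + 1 + (st.length : Int)).toNat = (j + (st.length : Int)).toNat + 1 := by omega
            rw [h1, h2]
            simp [List.take_succ_cons, List.drop_succ_cons]

-- ===== VERDICT (by name: the statement is the Claim_ definition above) =====
theorem delete_subtuple_spec : Claim_equal_delete_subtuple := by
  intro lt st _
  unfold Spec_delete_subtuple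
  rw [a_eq_refDel st lt, alt_eq_refDel lt st]
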